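-- pv_equiv track=rewrite | github.com/avishek376/Scaler-Problem-Solving | Advanced/02 Advanced DSA : Arrays - 2 /Assignment/Q1. Sum of all Submatrices/Sum of all Submatrices.py | solve
-- ===== SOURCE A (Python) =====
-- def solve(A):
--     res = 0
--     n = len(A)
--     for i in range(n):
--         for j in range(n):
--             cTL = (i+1) * (j+1)
--             cBR = (n-i) * (n-j)
--             res += cTL * cBR * A[i][j]
--     return res
-- ===== SOURCE B (Python) =====
-- def solve(A):
--     n = len(A)
--     # P[r][c] = sum of the top-left r x c block of A
--     P = [[0] * (n + 1)]
--     for row in A: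
--         prev = P[-1]
--         cur = [0]
--         s = 0
--         for c in range(n):
--             s += row[c]
--             cur.append(prev[c + 1] + s)
--         P.append(cur)
--     res = 0
--     for r1 in range(n):
--         for r2 in range(r1, n):
--             for c1 in range(n):
--                 for c2 in range(c1, n):
--                     res += P[r2+1][c2+1] - P[r1][c2+1] - P[r2+1][c1] + P[r1][c1]
--     return res
-- ===== Notes on version B (the rewrite author's own statement) =====
-- stated objective: alternative
-- what changed: B drops A's closed-form multiplicity count and instead builds a 2D prefix-sum table, then enumerates every submatrix (all top-left/bottom-right corner pairs) and adds its sum obtained by inclusion-exclusion on the table.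
import Mathlib
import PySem

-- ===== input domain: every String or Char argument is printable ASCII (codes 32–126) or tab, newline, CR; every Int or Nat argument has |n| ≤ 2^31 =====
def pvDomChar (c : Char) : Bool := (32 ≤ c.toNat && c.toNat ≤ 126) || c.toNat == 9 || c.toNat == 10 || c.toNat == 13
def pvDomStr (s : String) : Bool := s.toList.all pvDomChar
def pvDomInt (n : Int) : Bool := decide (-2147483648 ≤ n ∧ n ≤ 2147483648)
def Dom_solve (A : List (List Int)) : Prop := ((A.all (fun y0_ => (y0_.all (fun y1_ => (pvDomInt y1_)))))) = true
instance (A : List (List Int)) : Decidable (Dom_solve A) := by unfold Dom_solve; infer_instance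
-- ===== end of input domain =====

-- B replaces A's closed-form multiplicity count by a 2D prefix-sum table plus direct
-- enumeration of all submatrices (an alternative algorithm; O(n^4) vs A's O(n^2), not faster).


-- ===== PORT A =====
def solve (A : List (List Int)) : Int :=
  let n : Int := PySem.List.len A
  (PySem.List.pyRange 0 n 1).foldl (fun res i =>
    (PySem.List.pyRange 0 n 1).foldl (fun res j =>
      let cTL := (i + 1) * (j + 1)
      let cBR := (n - i) * (n - j)
      res + cTL * cBR * PySem.List.pyGetD (PySem.List.pyGetD A i []) j 0) res) 0

-- ===== PORT B =====
def solve_alt (A : List (List Int)) : Int :=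
  let n : Int := PySem.List.len A
  -- P[r][c] = sum of the top-left r x c block of A
  let P : List (List Int) := A.foldl (fun P row =>
      let prev := PySem.List.pyGetD P (-1) []
      let st := (PySem.List.pyRange 0 n 1).foldl
        (fun (st : List Int × Int) c =>
          let s := st.2 + PySem.List.pyGetD row c 0
          (st.1 ++ [PySem.List.pyGetD prev (c + 1) 0 + s], s))
        ([0], 0)
      P ++ [st.1]) [List.replicate (n.toNat + 1) 0]
  (PySem.List.pyRange 0 n 1).foldl (fun res r1 =>
    (PySem.List.pyRange r1 n 1).foldl (fun res r2 =>
      (PySem.List.pyRange 0 n 1).foldl (fun res c1 =>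
        (PySem.List.pyRange c1 n 1).foldl (fun res c2 =>
          res + PySem.List.pyGetD (PySem.List.pyGetD P (r2 + 1) []) (c2 + 1) 0
              - PySem.List.pyGetD (PySem.List.pyGetD P r1 []) (c2 + 1) 0
              - PySem.List.pyGetD (PySem.List.pyGetD P (r2 + 1) []) c1 0
              + PySem.List.pyGetD (PySem.List.pyGetD P r1 []) c1 0) res) res) res) 0

-- ===== PRECONDITION & SPEC =====
-- Pre_ excludes exactly the inputs where some of the first n = len(A) rows is shorter than n:
-- there A (and B) raise IndexError on A[i][j] (row[c]).
def Pre_solve (A : List (List Int)) : Prop := ∀ row ∈ A, A.length ≤ row.length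
instance (A : List (List Int)) : Decidable (Pre_solve A) := by unfold Pre_solve; infer_instance
def pvWitness_solve : List (List Int) := [[1, -2], [3, 4]]
def Spec_solve (A : List (List Int)) (out : Int) : Prop := out = solve_alt A
instance (A : List (List Int)) (out : Int) : Decidable (Spec_solve A out) := by unfold Spec_solve; infer_instance

-- ===== CLAIM (what is proved, stated in full; the proofs are below) =====
def Claim_equal_solve : Prop := ∀ (A : List (List Int)), Dom_solve A → Pre_solve A → Spec_solve A (solve A)

-- ===== LEMMAS AND PROOFS =====

-- entry A[i][j] (total form), and Q A r c = sum of the top-left r x c block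
def ent (A : List (List Int)) (i j : Nat) : Int := (A.getD i []).getD j 0
def Q (A : List (List Int)) (r c : Nat) : Int :=
  ∑ i ∈ Finset.range r, ∑ j ∈ Finset.range c, ent A i j

lemma foldl_body_eq {α : Type} (l : List α) (f g : Int → α → Int) (init : Int)
    (h : ∀ r x, f r x = g r x) : l.foldl f init = l.foldl g init := by
  have hfg : f = g := funext fun r => funext fun x => h r x
  rw [hfg]

lemma foldl_sum_pyRange (a b : Int) (g : Int → Int) (init : Int) :
    (PySem.List.pyRange a b 1).foldl (fun res x => res + g x) init
      = init + ∑ k ∈ Finset.range (b - a).toNat, g (a + (k : Int)) := by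
  rw [PySem.List.foldl_add, PySem.List.pyRange_one, List.map_map]
  rfl

lemma doubleFold (n : Nat) (M : List (List Int)) :
    (PySem.List.pyRange 0 (n : Int) 1).foldl (fun res i =>
      (PySem.List.pyRange 0 (n : Int) 1).foldl (fun res j =>
        res + (i + 1) * (j + 1) * (((n : Int) - i) * ((n : Int) - j))
            * PySem.List.pyGetD (PySem.List.pyGetD M i []) j 0) res) 0
    = ∑ i ∈ Finset.range n, ∑ j ∈ Finset.range n,
        ((i : Int) + 1) * ((j : Int) + 1) * (((n : Int) - i) * ((n : Int) - j)) * ent M i j := by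
  have h1 : ∀ (res i : Int),
      (PySem.List.pyRange 0 (n : Int) 1).foldl (fun res j =>
        res + (i + 1) * (j + 1) * (((n : Int) - i) * ((n : Int) - j))
            * PySem.List.pyGetD (PySem.List.pyGetD M i []) j 0) res
      = res + ∑ k ∈ Finset.range n, (i + 1) * ((k : Int) + 1) * (((n : Int) - i) * ((n : Int) - (k : Int)))
            * PySem.List.pyGetD (PySem.List.pyGetD M i []) (k : Int) 0 := by
    intro res i
    rw [foldl_sum_pyRange]
    simp
  rw [foldl_body_eq _ _ _ 0 h1, foldl_sum_pyRange]
  simp [ent]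

-- the 1D counting identity behind the equivalence
lemma oneD (n : Nat) (f : Nat → Int) :
    ∑ r1 ∈ Finset.range n, ∑ r2 ∈ Finset.Ico r1 n, ∑ i ∈ Finset.Ico r1 (r2 + 1), f i
      = ∑ i ∈ Finset.range n, ((i : Int) + 1) * ((n : Int) - (i : Int)) * f i := by
  have h1 : ∀ r1, ∑ r2 ∈ Finset.Ico r1 n, ∑ i ∈ Finset.Ico r1 (r2 + 1), f i
      = ∑ i ∈ Finset.Ico r1 n, ((n - i : Nat) : Int) * f i := by
    intro r1
    rw [← Finset.sum_Ico_Ico_comm r1 n (fun i r2 => f i)]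
    refine Finset.sum_congr rfl fun i hi => ?_
    rw [Finset.sum_const, Nat.card_Ico, nsmul_eq_mul]
  simp only [h1]
  rw [← Nat.Ico_zero_eq_range, Finset.sum_Ico_Ico_comm]
  refine Finset.sum_congr rfl fun i hi => ?_
  rw [Finset.sum_const, Nat.card_Ico, nsmul_eq_mul]
  rw [Nat.Ico_zero_eq_range, Finset.mem_range] at hi
  push_cast [Nat.sub_zero, hi.le]
  ring

lemma incl_excl (A : List (List Int)) (r1 r2 c1 c2 : Nat) (hr : r1 ≤ r2 + 1) (hc : c1 ≤ c2 + 1) :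
    Q A (r2 + 1) (c2 + 1) - Q A r1 (c2 + 1) - Q A (r2 + 1) c1 + Q A r1 c1
      = ∑ i ∈ Finset.Ico r1 (r2 + 1), ∑ j ∈ Finset.Ico c1 (c2 + 1), ent A i j := by
  have hcol : ∀ i, ∑ j ∈ Finset.Ico c1 (c2 + 1), ent A i j
      = ∑ j ∈ Finset.range (c2 + 1), ent A i j - ∑ j ∈ Finset.range c1, ent A i j :=
    fun i => Finset.sum_Ico_eq_sub _ hc
  simp only [hcol, Finset.sum_sub_distrib]
  rw [Finset.sum_Ico_eq_sub _ hr, Finset.sum_Ico_eq_sub _ hr]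
  unfold Q
  ring

lemma quadFold (n : Nat) (P : List (List Int)) :
    (PySem.List.pyRange 0 (n : Int) 1).foldl (fun res r1 =>
      (PySem.List.pyRange r1 (n : Int) 1).foldl (fun res r2 =>
        (PySem.List.pyRange 0 (n : Int) 1).foldl (fun res c1 =>
          (PySem.List.pyRange c1 (n : Int) 1).foldl (fun res c2 =>
            res + PySem.List.pyGetD (PySem.List.pyGetD P (r2 + 1) []) (c2 + 1) 0
                - PySem.List.pyGetD (PySem.List.pyGetD P r1 []) (c2 + 1) 0
                - PySem.List.pyGetD (PySem.List.pyGetD P (r2 + 1) []) c1 0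
                + PySem.List.pyGetD (PySem.List.pyGetD P r1 []) c1 0) res) res) res) 0
    = ∑ r1 ∈ Finset.range n, ∑ r2 ∈ Finset.Ico r1 n, ∑ c1 ∈ Finset.range n, ∑ c2 ∈ Finset.Ico c1 n,
        (PySem.List.pyGetD (PySem.List.pyGetD P ((r2 : Int) + 1) []) ((c2 : Int) + 1) 0
          - PySem.List.pyGetD (PySem.List.pyGetD P (r1 : Int) []) ((c2 : Int) + 1) 0
          - PySem.List.pyGetD (PySem.List.pyGetD P ((r2 : Int) + 1) []) (c1 : Int) 0
          + PySem.List.pyGetD (PySem.List.pyGetD P (r1 : Int) []) (c1 : Int) 0) := by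
  set T := fun (r1 r2 c1 c2 : Int) =>
      PySem.List.pyGetD (PySem.List.pyGetD P (r2 + 1) []) (c2 + 1) 0
        - PySem.List.pyGetD (PySem.List.pyGetD P r1 []) (c2 + 1) 0
        - PySem.List.pyGetD (PySem.List.pyGetD P (r2 + 1) []) c1 0
        + PySem.List.pyGetD (PySem.List.pyGetD P r1 []) c1 0 with hT
  have h4 : ∀ (r1 r2 res c1 : Int),
      (PySem.List.pyRange c1 (n : Int) 1).foldl (fun res c2 =>
        res + PySem.List.pyGetD (PySem.List.pyGetD P (r2 + 1) []) (c2 + 1) 0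
            - PySem.List.pyGetD (PySem.List.pyGetD P r1 []) (c2 + 1) 0
            - PySem.List.pyGetD (PySem.List.pyGetD P (r2 + 1) []) c1 0
            + PySem.List.pyGetD (PySem.List.pyGetD P r1 []) c1 0) res
      = res + ∑ k ∈ Finset.range ((n : Int) - c1).toNat, T r1 r2 c1 (c1 + (k : Int)) := by
    intro r1 r2 res c1
    rw [foldl_body_eq _ _ (fun res c2 => res + T r1 r2 c1 c2) res
      (fun r x => by simp only [hT]; ring), foldl_sum_pyRange]
  have h3 : ∀ (r1 r2 res : Int),
      (PySem.List.pyRange 0 (n : Int) 1).foldl (fun res c1 =>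
        (PySem.List.pyRange c1 (n : Int) 1).foldl (fun res c2 =>
          res + PySem.List.pyGetD (PySem.List.pyGetD P (r2 + 1) []) (c2 + 1) 0
              - PySem.List.pyGetD (PySem.List.pyGetD P r1 []) (c2 + 1) 0
              - PySem.List.pyGetD (PySem.List.pyGetD P (r2 + 1) []) c1 0
              + PySem.List.pyGetD (PySem.List.pyGetD P r1 []) c1 0) res) res
      = res + ∑ k3 ∈ Finset.range ((n : Int) - 0).toNat,
          ∑ k4 ∈ Finset.range ((n : Int) - (0 + (k3 : Int))).toNat,
            T r1 r2 (0 + (k3 : Int)) ((0 + (k3 : Int)) + (k4 : Int)) := by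
    intro r1 r2 res
    rw [foldl_body_eq _ _ _ res (h4 r1 r2), foldl_sum_pyRange]
  have h2 : ∀ (res r1 : Int),
      (PySem.List.pyRange r1 (n : Int) 1).foldl (fun res r2 =>
        (PySem.List.pyRange 0 (n : Int) 1).foldl (fun res c1 =>
          (PySem.List.pyRange c1 (n : Int) 1).foldl (fun res c2 =>
            res + PySem.List.pyGetD (PySem.List.pyGetD P (r2 + 1) []) (c2 + 1) 0
                - PySem.List.pyGetD (PySem.List.pyGetD P r1 []) (c2 + 1) 0
                - PySem.List.pyGetD (PySem.List.pyGetD P (r2 + 1) []) c1 0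
                + PySem.List.pyGetD (PySem.List.pyGetD P r1 []) c1 0) res) res) res
      = res + ∑ k2 ∈ Finset.range ((n : Int) - r1).toNat,
          ∑ k3 ∈ Finset.range ((n : Int) - 0).toNat,
            ∑ k4 ∈ Finset.range ((n : Int) - (0 + (k3 : Int))).toNat,
              T r1 (r1 + (k2 : Int)) (0 + (k3 : Int)) ((0 + (k3 : Int)) + (k4 : Int)) := by
    intro res r1
    rw [foldl_body_eq _ _ _ res (fun res r2 => h3 r1 r2 res), foldl_sum_pyRange]
  rw [foldl_body_eq _ _ _ 0 h2, foldl_sum_pyRange]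
  simp only [Finset.sum_Ico_eq_sum_range, zero_add, sub_zero, Int.toNat_natCast, Int.toNat_sub, hT]
  push_cast
  ring_nf

-- row r of the prefix table, and the full table
def rowQ (A : List (List Int)) (r : Nat) : List Int :=
  (List.range (A.length + 1)).map (fun c => Q A r c)
def Ptab (A : List (List Int)) : List (List Int) :=
  (List.range (A.length + 1)).map (rowQ A)

lemma Q_zero_left (A : List (List Int)) (c : Nat) : Q A 0 c = 0 := by simp [Q]

lemma Q_succ_left (A : List (List Int)) (r c : Nat) :
    Q A (r + 1) c = Q A r c + ∑ j ∈ Finset.range c, ent A r j := Finset.sum_range_succ _ _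

-- one row of B's table-building loop
lemma innerFold (A : List (List Int)) (k : Nat) :
    ∀ m, m ≤ A.length →
    (PySem.List.pyRange 0 (m : Int) 1).foldl
      (fun (st : List Int × Int) c =>
        (st.1 ++ [PySem.List.pyGetD (rowQ A k) (c + 1) 0 + (st.2 + PySem.List.pyGetD (A.getD k []) c 0)],
         st.2 + PySem.List.pyGetD (A.getD k []) c 0))
      ([0], 0)
    = ((List.range (m + 1)).map (fun c => Q A (k + 1) c), ∑ j ∈ Finset.range m, ent A k j) := by
  intro m
  induction m with
  | zero =>
    intro _
    simp [PySem.List.pyRange_one_eq_nil, List.range_succ, Q]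
  | succ m ih =>
    intro hm
    have h1 : ((m + 1 : Nat) : Int) = (m : Int) + 1 := by push_cast; ring
    rw [h1, PySem.List.pyRange_one_succ_right (by positivity), List.foldl_append,
      ih (by omega)]
    have h2 : (m : Int) + 1 = ((m + 1 : Nat) : Int) := by push_cast; ring
    simp only [List.foldl_cons, List.foldl_nil, h2, PySem.List.pyGetD_natCast, rowQ]
    rw [PySem.List.getD_map_range _ _ _ _ (by omega)]
    have hent : (A.getD k []).getD m 0 = ent A k m := rfl
    rw [hent, List.range_succ (n := m + 1), List.map_append, Finset.sum_range_succ]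
    have hnew : Q A k (m + 1) + ((∑ j ∈ Finset.range m, ent A k j) + ent A k m)
        = Q A (k + 1) (m + 1) := by rw [Q_succ_left, Finset.sum_range_succ]
    rw [hnew]
    rfl

-- B's whole table-building loop produces Ptab
lemma buildP_aux (A : List (List Int)) :
    ∀ (rest : List (List Int)) (k : Nat), A.drop k = rest → k ≤ A.length →
    rest.foldl
      (fun (P : List (List Int)) row =>
        P ++ [((PySem.List.pyRange 0 ((A.length : Int)) 1).foldl
          (fun (st : List Int × Int) c =>
            (st.1 ++ [PySem.List.pyGetD (PySem.List.pyGetD P (-1) []) (c + 1) 0 + (st.2 + PySem.List.pyGetD row c 0)],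
             st.2 + PySem.List.pyGetD row c 0))
          ([0], 0)).1])
      ((List.range (k + 1)).map (rowQ A))
    = Ptab A := by
  intro rest
  induction rest with
  | nil =>
    intro k hdrop hk
    have hlen : A.length ≤ k := by
      have := List.drop_eq_nil_iff.mp hdrop
      omega
    have hkeq : k = A.length := by omega
    simp [hkeq, Ptab]
  | cons row rest' ih =>
    intro k hdrop hk
    have hget : A[k]? = some row := by
      have h0 : (A.drop k)[0]? = A[k]? := by simp
      rw [hdrop] at h0
      simpa using h0.symm
    have hklt : k < A.length := by
      have := List.getElem?_eq_some_iff.mp hget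
      exact this.1
    have hrow : A.getD k [] = row := by
      rw [List.getD_eq_getElem?_getD, hget]; rfl
    have hdrop' : A.drop (k + 1) = rest' := by
      have h1 : (A.drop k).drop 1 = rest' := by rw [hdrop]; rfl
      rw [List.drop_drop] at h1
      simpa [Nat.add_comm] using h1
    have hacc : PySem.List.pyGetD ((List.range (k + 1)).map (rowQ A)) (-1) [] = rowQ A k := by
      rw [List.range_succ, List.map_append]
      exact PySem.List.pyGetD_neg_one_append_singleton _ _ _
    rw [List.foldl_cons]
    have hstep :
        ((List.range (k + 1)).map (rowQ A)) ++ [((PySem.List.pyRange 0 ((A.length : Int)) 1).foldl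
          (fun (st : List Int × Int) c =>
            (st.1 ++ [PySem.List.pyGetD (PySem.List.pyGetD ((List.range (k + 1)).map (rowQ A)) (-1) []) (c + 1) 0 + (st.2 + PySem.List.pyGetD row c 0)],
             st.2 + PySem.List.pyGetD row c 0))
          ([0], 0)).1]
        = (List.range (k + 2)).map (rowQ A) := by
      simp only [hacc, ← hrow]
      rw [innerFold A k A.length le_rfl]
      rw [List.range_succ (n := k + 1), List.map_append]
      rfl
    rw [hstep]
    exact ih (k + 1) hdrop' hklt

-- reading the table back
lemma Ptab_getD (A : List (List Int)) (r c : Nat) (hr : r ≤ A.length) (hc : c ≤ A.length) :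
    PySem.List.pyGetD (PySem.List.pyGetD (Ptab A) (r : Int) []) (c : Int) 0 = Q A r c := by
  simp only [PySem.List.pyGetD_natCast, Ptab]
  rw [PySem.List.getD_map_range _ _ _ _ (by omega)]
  unfold rowQ
  rw [PySem.List.getD_map_range _ _ _ _ (by omega)]

-- the combinatorial core: enumerating all submatrices is the multiplicity count
lemma combine (A : List (List Int)) (n : Nat) :
    ∑ r1 ∈ Finset.range n, ∑ r2 ∈ Finset.Ico r1 n, ∑ c1 ∈ Finset.range n, ∑ c2 ∈ Finset.Ico c1 n,
      ∑ i ∈ Finset.Ico r1 (r2 + 1), ∑ j ∈ Finset.Ico c1 (c2 + 1), ent A i j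
    = ∑ i ∈ Finset.range n, ∑ j ∈ Finset.range n,
        ((i : Int) + 1) * ((j : Int) + 1) * (((n : Int) - i) * ((n : Int) - j)) * ent A i j := by
  have hfix : ∀ r1 r2 : Nat,
      ∑ c1 ∈ Finset.range n, ∑ c2 ∈ Finset.Ico c1 n, ∑ i ∈ Finset.Ico r1 (r2 + 1),
        ∑ j ∈ Finset.Ico c1 (c2 + 1), ent A i j
      = ∑ i ∈ Finset.Ico r1 (r2 + 1), ∑ j ∈ Finset.range n,
          ((j : Int) + 1) * ((n : Int) - (j : Int)) * ent A i j := by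
    intro r1 r2
    calc ∑ c1 ∈ Finset.range n, ∑ c2 ∈ Finset.Ico c1 n, ∑ i ∈ Finset.Ico r1 (r2 + 1),
          ∑ j ∈ Finset.Ico c1 (c2 + 1), ent A i j
        = ∑ c1 ∈ Finset.range n, ∑ i ∈ Finset.Ico r1 (r2 + 1), ∑ c2 ∈ Finset.Ico c1 n,
          ∑ j ∈ Finset.Ico c1 (c2 + 1), ent A i j :=
          Finset.sum_congr rfl fun c1 _ => Finset.sum_comm
      _ = ∑ i ∈ Finset.Ico r1 (r2 + 1), ∑ c1 ∈ Finset.range n, ∑ c2 ∈ Finset.Ico c1 n,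
          ∑ j ∈ Finset.Ico c1 (c2 + 1), ent A i j := Finset.sum_comm
      _ = ∑ i ∈ Finset.Ico r1 (r2 + 1), ∑ j ∈ Finset.range n,
          ((j : Int) + 1) * ((n : Int) - (j : Int)) * ent A i j :=
          Finset.sum_congr rfl fun i _ => oneD n (fun j => ent A i j)
  simp only [hfix]
  rw [oneD n (fun i => ∑ j ∈ Finset.range n, ((j : Int) + 1) * ((n : Int) - (j : Int)) * ent A i j)]
  refine Finset.sum_congr rfl fun i _ => ?_
  rw [Finset.mul_sum]
  refine Finset.sum_congr rfl fun j _ => ?_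
  ring

-- ===== VERDICT (by name: the statement is the Claim_ definition above) =====
theorem solve_spec : Claim_equal_solve := by
  intro A _hdom _hpre
  show solve A = solve_alt A
  have hA : solve A = ∑ i ∈ Finset.range A.length, ∑ j ∈ Finset.range A.length,
      ((i : Int) + 1) * ((j : Int) + 1) * (((A.length : Int) - i) * ((A.length : Int) - j)) * ent A i j := by
    simp only [solve, PySem.List.len_eq]
    exact doubleFold A.length A
  have hP : A.foldl
      (fun (P : List (List Int)) row =>
        P ++ [((PySem.List.pyRange 0 ((A.length : Int)) 1).foldl
          (fun (st : List Int × Int) c =>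
            (st.1 ++ [PySem.List.pyGetD (PySem.List.pyGetD P (-1) []) (c + 1) 0 + (st.2 + PySem.List.pyGetD row c 0)],
             st.2 + PySem.List.pyGetD row c 0))
          ([0], 0)).1])
      [List.replicate (A.length + 1) 0]
      = Ptab A := by
    have h0 : [List.replicate (A.length + 1) (0 : Int)] = (List.range (0 + 1)).map (rowQ A) := by
      rw [List.range_one, List.map_cons, List.map_nil]
      congr 1
      unfold rowQ
      rw [List.map_congr_left (fun c _ => Q_zero_left A c)]
      rw [List.map_const', List.length_range]
    rw [h0]
    exact buildP_aux A A 0 (by simp) (by omega)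
  have hB : solve_alt A
      = ∑ r1 ∈ Finset.range A.length, ∑ r2 ∈ Finset.Ico r1 A.length,
        ∑ c1 ∈ Finset.range A.length, ∑ c2 ∈ Finset.Ico c1 A.length,
          (Q A (r2 + 1) (c2 + 1) - Q A r1 (c2 + 1) - Q A (r2 + 1) c1 + Q A r1 c1) := by
    simp only [solve_alt, PySem.List.len_eq, Int.toNat_natCast]
    simp only [hP]
    rw [quadFold A.length (Ptab A)]
    refine Finset.sum_congr rfl fun r1 h1 => Finset.sum_congr rfl fun r2 h2 =>
      Finset.sum_congr rfl fun c1 h3 => Finset.sum_congr rfl fun c2 h4 => ?_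
    rw [Finset.mem_range] at h1 h3
    rw [Finset.mem_Ico] at h2 h4
    have e1 : ((r2 : Int) + 1) = ((r2 + 1 : Nat) : Int) := by push_cast; ring
    have e2 : ((c2 : Int) + 1) = ((c2 + 1 : Nat) : Int) := by push_cast; ring
    rw [e1, e2, Ptab_getD A _ _ (by omega) (by omega), Ptab_getD A _ _ (by omega) (by omega),
      Ptab_getD A _ _ (by omega) (by omega), Ptab_getD A _ _ (by omega) (by omega)]
  rw [hA, hB]
  rw [show (∑ r1 ∈ Finset.range A.length, ∑ r2 ∈ Finset.Ico r1 A.length,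
        ∑ c1 ∈ Finset.range A.length, ∑ c2 ∈ Finset.Ico c1 A.length,
          (Q A (r2 + 1) (c2 + 1) - Q A r1 (c2 + 1) - Q A (r2 + 1) c1 + Q A r1 c1))
      = ∑ r1 ∈ Finset.range A.length, ∑ r2 ∈ Finset.Ico r1 A.length,
        ∑ c1 ∈ Finset.range A.length, ∑ c2 ∈ Finset.Ico c1 A.length,
          ∑ i ∈ Finset.Ico r1 (r2 + 1), ∑ j ∈ Finset.Ico c1 (c2 + 1), ent A i j from
    Finset.sum_congr rfl fun r1 h1 => Finset.sum_congr rfl fun r2 h2 =>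
      Finset.sum_congr rfl fun c1 h3 => Finset.sum_congr rfl fun c2 h4 =>
        incl_excl A r1 r2 c1 c2 (by rw [Finset.mem_Ico] at h2; omega)
          (by rw [Finset.mem_Ico] at h4; omega)]
  rw [combine]
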